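-- pv_equiv track=rewrite | github.com/surajgholap/Python-Misc | DP_sum.py | sum_134
-- ===== SOURCE A (Python) =====
-- def sum_134(n):
--     "Return num of ways n can be represented as a sum of 1, 3, 4."
--     sum_num = []
--     for i in range(3):
--         sum_num.append(1)
--     sum_num.append(2)
--     for i in range(4, n+1):
--         sum_num.append(sum_num[i-1] + sum_num[i-3] + sum_num[i-4])
--     return sum_num[n]
-- ===== SOURCE B (Python) =====
-- def sum_134(n):
--     "Return num of ways n can be represented as a sum of 1, 3, 4."
--     # O(log n) via exponentiation of the recurrence matrix f(i)=f(i-1)+f(i-3)+f(i-4)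
--     if n < 0:
--         return 0
--     base = [1, 1, 1, 2]
--     if n < 4:
--         return base[n]
--     M = ((1, 0, 1, 1),
--          (1, 0, 0, 0),
--          (0, 1, 0, 0),
--          (0, 0, 1, 0))
--     I = ((1, 0, 0, 0),
--          (0, 1, 0, 0),
--          (0, 0, 1, 0),
--          (0, 0, 0, 1))
--
--     def mat_mul(A, B):
--         return tuple(tuple(sum(A[i][k] * B[k][j] for k in range(4))
--                            for j in range(4)) for i in range(4))
--
--     R, A, e = I, M, n - 3
--     while e > 0:
--         if e % 2 == 1:
--             R = mat_mul(R, A)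
--         A = mat_mul(A, A)
--         e //= 2
--     v = (2, 1, 1, 1)
--     return sum(R[0][k] * v[k] for k in range(4))
-- ===== Notes on version B (the rewrite author's own statement) =====
-- stated objective: faster
-- what changed: Replaced the O(n) append-to-a-list dynamic-programming table by O(log n) square-and-multiply exponentiation of the 4x4 companion matrix of the recurrence f(i)=f(i-1)+f(i-3)+f(i-4).
-- intended difference: For -4 <= n <= -1 A's final negative index wraps around its 4-element table and returns 1,1,1 or 2; B returns 0, the actual number of ways to write a negative n as a sum of 1, 3 and 4, which is the intended count. — e.g. on sum_134(-1): A returns 2, B returns 0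
import Mathlib
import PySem

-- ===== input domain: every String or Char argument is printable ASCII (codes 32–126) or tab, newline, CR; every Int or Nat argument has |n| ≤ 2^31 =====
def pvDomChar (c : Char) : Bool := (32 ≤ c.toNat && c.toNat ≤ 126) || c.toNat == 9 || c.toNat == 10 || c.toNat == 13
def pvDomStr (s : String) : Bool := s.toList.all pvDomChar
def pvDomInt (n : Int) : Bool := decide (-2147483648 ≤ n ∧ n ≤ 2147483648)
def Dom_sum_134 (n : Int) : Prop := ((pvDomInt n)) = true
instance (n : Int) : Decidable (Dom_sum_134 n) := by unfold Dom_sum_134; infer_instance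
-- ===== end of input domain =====

-- B replaces A's O(n) dynamic-programming table by O(log n) binary exponentiation of the
-- 4×4 companion matrix of the recurrence f(i) = f(i-1) + f(i-3) + f(i-4).

-- ===== PORT A =====
-- literal port of A: build the DP list by appending, then index it with Python semantics.
-- pyGet? ... |>.getD 0 is exact wherever Python does not raise; Pre_ excludes the raising inputs.
def sum_134 (n : Int) : Int :=
  let init : List Int :=
    ((PySem.List.pyRange 0 3 1).foldl (fun acc _ => acc ++ [(1 : Int)]) []) ++ [2]
  let l : List Int :=
    (PySem.List.pyRange 4 (n + 1) 1).foldl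
      (fun acc i =>
        acc ++ [(PySem.List.pyGet? acc (i - 1)).getD 0
                + (PySem.List.pyGet? acc (i - 3)).getD 0
                + (PySem.List.pyGet? acc (i - 4)).getD 0]) init
  (PySem.List.pyGet? l n).getD 0

-- ===== PORT B =====
abbrev V4 : Type := Int × Int × Int × Int
abbrev M4 : Type := V4 × V4 × V4 × V4

def v4dot (a b : V4) : Int :=
  a.1 * b.1 + a.2.1 * b.2.1 + a.2.2.1 * b.2.2.1 + a.2.2.2 * b.2.2.2

def m4col1 (B : M4) : V4 := (B.1.1, B.2.1.1, B.2.2.1.1, B.2.2.2.1)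
def m4col2 (B : M4) : V4 := (B.1.2.1, B.2.1.2.1, B.2.2.1.2.1, B.2.2.2.2.1)
def m4col3 (B : M4) : V4 := (B.1.2.2.1, B.2.1.2.2.1, B.2.2.1.2.2.1, B.2.2.2.2.2.1)
def m4col4 (B : M4) : V4 := (B.1.2.2.2, B.2.1.2.2.2, B.2.2.1.2.2.2, B.2.2.2.2.2.2)

def m4mul (A B : M4) : M4 :=
  ((v4dot A.1 (m4col1 B), v4dot A.1 (m4col2 B), v4dot A.1 (m4col3 B), v4dot A.1 (m4col4 B)),
   (v4dot A.2.1 (m4col1 B), v4dot A.2.1 (m4col2 B), v4dot A.2.1 (m4col3 B), v4dot A.2.1 (m4col4 B)),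
   (v4dot A.2.2.1 (m4col1 B), v4dot A.2.2.1 (m4col2 B), v4dot A.2.2.1 (m4col3 B), v4dot A.2.2.1 (m4col4 B)),
   (v4dot A.2.2.2 (m4col1 B), v4dot A.2.2.2 (m4col2 B), v4dot A.2.2.2 (m4col3 B), v4dot A.2.2.2 (m4col4 B)))

def m4id : M4 := ((1,0,0,0), (0,1,0,0), (0,0,1,0), (0,0,0,1))

def m4M : M4 := ((1,0,1,1), (1,0,0,0), (0,1,0,0), (0,0,1,0))

-- the `while e > 0` square-and-multiply loop of Source B
def matPowLoop (R A : M4) (e : Nat) : M4 :=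
  if h : e = 0 then R
  else matPowLoop (if e % 2 = 1 then m4mul R A else R) (m4mul A A) (e / 2)
  termination_by e
  decreasing_by exact Nat.div_lt_self (Nat.pos_of_ne_zero h) (by omega)

def sum_134_alt (n : Int) : Int :=
  if n < 0 then 0
  else if n < 4 then (PySem.List.pyGet? ([1, 1, 1, 2] : List Int) n).getD 0
  else
    let R := matPowLoop m4id m4M (n - 3).toNat
    v4dot R.1 (2, 1, 1, 1)

-- ===== PRECONDITION & SPEC =====
-- Pre_ excludes exactly n < -4, where A raises IndexError (list of length 4, index n).
def Pre_sum_134 (n : Int) : Prop := -4 ≤ n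
instance (n : Int) : Decidable (Pre_sum_134 n) := by unfold Pre_sum_134; infer_instance
def pvWitness_sum_134 : Int := (5)

-- On -4 ≤ n ≤ -1 A's negative index wraps around the 4-element table and returns 1,1,1,2;
-- B returns 0, the number of ways to write a negative n as a sum of 1, 3 and 4, which is the intended count.
def D_sum_134 (n : Int) : Prop := -4 ≤ n ∧ n < 0
instance (n : Int) : Decidable (D_sum_134 n) := by unfold D_sum_134; infer_instance

def Spec_sum_134 (n : Int) (out : Int) : Prop := ¬ D_sum_134 n → out = sum_134_alt n
instance (n : Int) (out : Int) : Decidable (Spec_sum_134 n out) := by unfold Spec_sum_134; infer_instance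

def pvDiffWitness_sum_134 : Int := (-1)
def pvDiffWitnessOut_sum_134 : Int × Int := (2, 0)

-- ===== CLAIM (what is proved, stated in full; the proofs are below) =====
def Claim_unchanged_sum_134 : Prop := ∀ (n : Int), Dom_sum_134 n → Pre_sum_134 n → Spec_sum_134 n (sum_134 n)
def Claim_changed_sum_134 : Prop := Dom_sum_134 (pvDiffWitness_sum_134) ∧ Pre_sum_134 (pvDiffWitness_sum_134) ∧ D_sum_134 (pvDiffWitness_sum_134) ∧ sum_134 (pvDiffWitness_sum_134) = pvDiffWitnessOut_sum_134.1 ∧ sum_134_alt (pvDiffWitness_sum_134) = pvDiffWitnessOut_sum_134.2 ∧ pvDiffWitnessOut_sum_134.1 ≠ pvDiffWitnessOut_sum_134.2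
def Claim_exact_sum_134 : Prop := ∀ (n : Int), Dom_sum_134 n → Pre_sum_134 n → D_sum_134 n → sum_134 n ≠ sum_134_alt n

-- ===== LEMMAS AND PROOFS =====

-- the mathematical sequence both programs compute for n ≥ 0
def fseq : Nat → Int
  | 0 => 1
  | 1 => 1
  | 2 => 1
  | 3 => 2
  | k + 4 => fseq (k + 3) + fseq (k + 1) + fseq k

def fList (m : Nat) : List Int := (List.range m).map fseq

-- ---- B side ----

def m4pow (A : M4) : Nat → M4
  | 0 => m4id
  | k + 1 => m4mul A (m4pow A k)

theorem m4mul_id_left (A : M4) : m4mul m4id A = A := by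
  simp [m4mul, m4id, v4dot, m4col1, m4col2, m4col3, m4col4]

theorem m4mul_id_right (A : M4) : m4mul A m4id = A := by
  simp [m4mul, m4id, v4dot, m4col1, m4col2, m4col3, m4col4]

theorem m4mul_assoc (A B C : M4) : m4mul (m4mul A B) C = m4mul A (m4mul B C) := by
  simp only [m4mul, v4dot, m4col1, m4col2, m4col3, m4col4, Prod.ext_iff]
  refine ⟨⟨by ring, by ring, by ring, by ring⟩, ⟨by ring, by ring, by ring, by ring⟩,
    ⟨by ring, by ring, by ring, by ring⟩, ⟨by ring, by ring, by ring, by ring⟩⟩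

theorem m4pow_sq (A : M4) (k : Nat) : m4pow (m4mul A A) k = m4pow A (2 * k) := by
  induction k with
  | zero => simp [m4pow]
  | succ k ih =>
      have h : 2 * (k + 1) = (2 * k) + 1 + 1 := by omega
      rw [h]
      simp [m4pow, ih, m4mul_assoc]

theorem matPowLoop_eq (e : Nat) : ∀ R A : M4, matPowLoop R A e = m4mul R (m4pow A e) := by
  induction e using Nat.strong_induction_on with
  | _ e ih =>
    intro R A
    by_cases h : e = 0
    · subst h; rw [matPowLoop]; simp [m4pow, m4mul_id_right]
    · rw [matPowLoop]
      rw [dif_neg h]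
      rw [ih (e / 2) (Nat.div_lt_self (Nat.pos_of_ne_zero h) (by omega))]
      rw [m4pow_sq]
      by_cases hp : e % 2 = 1
      · have he : e = 2 * (e / 2) + 1 := by omega
        rw [if_pos hp, m4mul_assoc]
        rw [show m4mul A (m4pow A (2 * (e / 2))) = m4pow A e from by
          conv_rhs => rw [he]
          rfl]
      · have he : e = 2 * (e / 2) := by omega
        rw [if_neg hp, ← he]

def mvApp (A : M4) (v : V4) : V4 :=
  (v4dot A.1 v, v4dot A.2.1 v, v4dot A.2.2.1 v, v4dot A.2.2.2 v)

theorem mvApp_mul (A B : M4) (v : V4) : mvApp (m4mul A B) v = mvApp A (mvApp B v) := by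
  simp only [mvApp, m4mul, v4dot, m4col1, m4col2, m4col3, m4col4, Prod.ext_iff]
  exact ⟨by ring, by ring, by ring, by ring⟩

theorem mvApp_step (k : Nat) :
    mvApp m4M (fseq (k + 3), fseq (k + 2), fseq (k + 1), fseq k)
      = (fseq (k + 4), fseq (k + 3), fseq (k + 2), fseq (k + 1)) := by
  simp only [mvApp, m4M, v4dot, Prod.ext_iff]
  refine ⟨?_, by ring, by ring, by ring⟩
  rw [show fseq (k + 4) = fseq (k + 3) + fseq (k + 1) + fseq k from rfl]
  ring

theorem m4pow_vec (k : Nat) :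
    mvApp (m4pow m4M k) (2, 1, 1, 1)
      = (fseq (k + 3), fseq (k + 2), fseq (k + 1), fseq k) := by
  induction k with
  | zero => rfl
  | succ k ih =>
      rw [m4pow, mvApp_mul, ih]
      rw [mvApp_step]

-- B's value on n ≥ 4
theorem alt_eq_fseq_of_ge (n : Int) (h : 4 ≤ n) : sum_134_alt n = fseq n.toNat := by
  have h0 : ¬ n < 0 := by omega
  have h4 : ¬ n < 4 := by omega
  rw [sum_134_alt, if_neg h0, if_neg h4]
  have := matPowLoop_eq (n - 3).toNat m4id m4M
  rw [this, m4mul_id_left]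
  have hv := m4pow_vec (n - 3).toNat
  have hfst : v4dot (m4pow m4M (n - 3).toNat).1 (2, 1, 1, 1) = fseq ((n - 3).toNat + 3) := by
    have := congrArg Prod.fst hv
    simpa [mvApp] using this
  rw [hfst]
  congr 1
  omega

-- ---- A side ----

-- one loop iteration appends the next sequence value
theorem astep_fList (m : Nat) (hm : 4 ≤ m) :
    fList m ++ [(PySem.List.pyGet? (fList m) ((m : Int) - 1)).getD 0
      + (PySem.List.pyGet? (fList m) ((m : Int) - 3)).getD 0
      + (PySem.List.pyGet? (fList m) ((m : Int) - 4)).getD 0] = fList (m + 1) := by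
  obtain ⟨j, rfl⟩ := Nat.exists_eq_add_of_le hm
  have hlen : (fList (4 + j)).length = 4 + j := by simp [fList]
  have hget : ∀ k : Nat, k < 4 + j →
      (PySem.List.pyGet? (fList (4 + j)) (k : Int)).getD 0 = fseq k := by
    intro k hk
    rw [PySem.List.pyGet?_natCast]
    simp [fList, List.getElem?_map, List.getElem?_range hk]
  have e1 : ((4 + j : Nat) : Int) - 1 = ((3 + j : Nat) : Int) := by push_cast; ring
  have e3 : ((4 + j : Nat) : Int) - 3 = ((1 + j : Nat) : Int) := by push_cast; ring
  have e4 : ((4 + j : Nat) : Int) - 4 = ((j : Nat) : Int) := by push_cast; ring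
  rw [e1, e3, e4, hget _ (by omega), hget _ (by omega), hget _ (by omega)]
  have hval : fseq (3 + j) + fseq (1 + j) + fseq j = fseq (4 + j) := by
    rw [show 4 + j = j + 4 from by omega, show 3 + j = j + 3 from by omega,
        show 1 + j = j + 1 from by omega]
    rw [show fseq (j + 4) = fseq (j + 3) + fseq (j + 1) + fseq j from rfl]
  rw [hval]
  simp [fList, List.range_succ]

-- A's initial list is the first four sequence values
theorem init_eq_fList4 :
    ((PySem.List.pyRange 0 3 1).foldl (fun acc _ => acc ++ [(1 : Int)]) []) ++ [2] = fList 4 := by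
  decide

-- the DP loop builds fList
theorem loop_fList (j : Nat) :
    (PySem.List.pyRange 4 ((4 + j : Nat) : Int) 1).foldl
      (fun acc i =>
        acc ++ [(PySem.List.pyGet? acc (i - 1)).getD 0
                + (PySem.List.pyGet? acc (i - 3)).getD 0
                + (PySem.List.pyGet? acc (i - 4)).getD 0]) (fList 4) = fList (4 + j) := by
  induction j with
  | zero =>
      rw [show ((4 + 0 : Nat) : Int) = 4 from by norm_num]
      simp [PySem.List.pyRange]
  | succ j ih =>
      have hcast : ((4 + (j + 1) : Nat) : Int) = ((4 + j : Nat) : Int) + 1 := by push_cast; ring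
      rw [hcast, PySem.List.pyRange_one_succ_right (by push_cast; omega), List.foldl_append, ih]
      simp only [List.foldl_cons, List.foldl_nil]
      exact astep_fList (4 + j) (by omega)

theorem a_eq_fseq_of_ge (n : Int) (h : 4 ≤ n) : sum_134 n = fseq n.toNat := by
  obtain ⟨m, rfl⟩ : ∃ m : Nat, n = (m : Int) := ⟨n.toNat, by omega⟩
  have hm : 4 ≤ m := by exact_mod_cast h
  obtain ⟨j, rfl⟩ := Nat.exists_eq_add_of_le hm
  rw [sum_134, init_eq_fList4]
  have hc : ((4 + j : Nat) : Int) + 1 = ((4 + (j + 1) : Nat) : Int) := by push_cast; ring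
  rw [hc, loop_fList (j + 1)]
  rw [PySem.List.pyGet?_natCast]
  simp only [fList, List.getElem?_map]
  rw [List.getElem?_range (show 4 + j < 4 + (j + 1) from by omega)]
  simp only [Option.map_some, Option.getD_some]
  congr 1

-- ===== VERDICT (by name: the statement is the Claim_ definition above) =====
theorem sum_134_spec : Claim_unchanged_sum_134 := by
  intro n _ hpre hnD
  have hn : 0 ≤ n := by
    by_contra hneg
    exact hnD ⟨hpre, by omega⟩
  by_cases h4 : 4 ≤ n
  · rw [a_eq_fseq_of_ge n h4, alt_eq_fseq_of_ge n h4]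
  · interval_cases n <;> decide

theorem sum_134_changed : Claim_changed_sum_134 := by unfold Claim_changed_sum_134; decide

theorem sum_134_tight : Claim_exact_sum_134 := by
  intro n _ _ hD
  obtain ⟨h1, h2⟩ := hD
  interval_cases n <;> decide
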